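-- pv_equiv track=rewrite | github.com/fengwu2005/ml-hadwiger_project | exact_coloring.py | greedy_dsat_coloring
-- ===== SOURCE A (Python) =====
-- from typing import List, Tuple
--
-- def build_adjacency(n_nodes: int, edges: List[Tuple[int, int]]) -> List[List[int]]:
--     adj: List[List[int]] = [[] for _ in range(n_nodes)]
--     for u, v in edges:
--         adj[u].append(v)
--         adj[v].append(u)
--     return adj
--
-- def greedy_dsat_coloring(n_nodes: int, edges: List[Tuple[int, int]]) -> Tuple[List[int], int]:
--     """Fast heuristic coloring using a DSAT-like greedy strategy.
--
--     返回：每个点的颜色编号以及使用的颜色数 (这是一个上界，近似地反映“至少需要多少颜色”)。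
--     """
--
--     adj = build_adjacency(n_nodes, edges)
--     colors = [-1] * n_nodes
--     neighbor_colors = [set() for _ in range(n_nodes)]
--     uncolored = set(range(n_nodes))
--
--     while uncolored:
--         # 选 saturation（邻居已用颜色数）最大的点；若相同则选度数更大的
--         u = max(uncolored, key=lambda v: (len(neighbor_colors[v]), len(adj[v])))
--
--         used = neighbor_colors[u]
--         c = 0
--         while c in used:
--             c += 1
--         colors[u] = c
--         uncolored.remove(u)
--
--         for v in adj[u]:
--             if v in uncolored:
--                 neighbor_colors[v].add(c)
--
--     num_colors = max(colors) + 1 if colors else 0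
--     return colors, num_colors
-- ===== SOURCE B (Python) =====
-- from typing import List, Tuple
--
-- # DSATUR coloring with a lazy-deletion leftist min-heap over (-saturation,
-- # -degree, vertex) keys: each saturation bump pushes a fresh entry, stale
-- # entries are discarded at pop time, so no linear argmax scan per step.
--
-- def _merge(a, b):
--     """Merge two leftist heaps; nodes are (key, rank, left, right)."""
--     if a is None:
--         return b
--     if b is None:
--         return a
--     if b[0] < a[0]:
--         a, b = b, a
--     k, _, l, r = a
--     r = _merge(r, b)
--     rl = l[1] if l is not None else 0
--     rr = r[1] if r is not None else 0
--     if rl < rr: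
--         l, r = r, l
--         rl, rr = rr, rl
--     return (k, rr + 1, l, r)
--
-- def greedy_dsat_coloring(n_nodes: int, edges: List[Tuple[int, int]]) -> Tuple[List[int], int]:
--     adj: List[List[int]] = [[] for _ in range(n_nodes)]
--     for u, v in edges:
--         adj[u].append(v)
--         adj[v].append(u)
--
--     colors = [-1] * n_nodes
--     forbid = [set() for _ in range(n_nodes)]
--     uncolored = set(range(n_nodes))
--
--     heap = None
--     for v in range(n_nodes):
--         heap = _merge(heap, ((0, -len(adj[v]), v), 1, None, None))
--
--     while uncolored:
--         # pop until a live entry: vertex still uncolored, saturation current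
--         while True:
--             (nsat, ndeg, u), _, l, r = heap
--             heap = _merge(l, r)
--             if u in uncolored and -nsat == len(forbid[u]):
--                 break
--
--         c = 0
--         while c in forbid[u]:
--             c += 1
--         colors[u] = c
--         uncolored.remove(u)
--
--         for v in adj[u]:
--             if v in uncolored and c not in forbid[v]:
--                 forbid[v].add(c)
--                 heap = _merge(heap, ((-len(forbid[v]), -len(adj[v]), v), 1, None, None))
--
--     num_colors = max(colors) + 1 if colors else 0
--     return colors, num_colors
-- ===== Notes on version B (the rewrite author's own statement) =====
-- stated objective: faster
-- what changed: Replaces A's per-step max() scan over the uncolored set (which recomputes len(neighbor_colors[v]) for every comparison) by a lazy-deletion leftist min-heap keyed by (-saturation, -degree, vertex): each saturation increase pushes a fresh entry and stale entries are discarded at pop time, so no linear argmax scan per colored vertex.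
import Mathlib
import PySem

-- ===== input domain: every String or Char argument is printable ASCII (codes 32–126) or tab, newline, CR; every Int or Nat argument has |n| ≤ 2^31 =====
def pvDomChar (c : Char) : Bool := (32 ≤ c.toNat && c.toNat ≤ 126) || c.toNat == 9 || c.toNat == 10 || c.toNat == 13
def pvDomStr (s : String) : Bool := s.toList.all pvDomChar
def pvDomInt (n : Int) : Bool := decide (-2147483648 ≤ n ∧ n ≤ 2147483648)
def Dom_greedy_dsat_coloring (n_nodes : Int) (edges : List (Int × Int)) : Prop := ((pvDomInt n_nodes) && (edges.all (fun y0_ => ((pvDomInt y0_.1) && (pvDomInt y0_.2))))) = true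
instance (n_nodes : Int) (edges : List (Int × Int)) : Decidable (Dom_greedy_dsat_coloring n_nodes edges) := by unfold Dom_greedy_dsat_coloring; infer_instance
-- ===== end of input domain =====

-- B replaces A's per-step `max` scan over the uncolored set by a lazy-deletion leftist
-- min-heap keyed by (-saturation, -degree, vertex): each saturation increase pushes a
-- fresh entry, stale entries are discarded at pop time. Same value everywhere A returns;
-- A's `max` over its set of vertices is exact here because CPython iterates a set of the
-- ints 0..n-1 (built ascending, then only shrunk) in ascending order, so ties go to the
-- smallest vertex in both programs.

-- ===== PORT A =====
-- Python list-index resolution (negative index counts from the end); `adj[i].append(x)`.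
-- Exact wherever Python's indexing succeeds (guaranteed by Pre_); out of range it no-ops
-- where Python raises IndexError (those inputs are outside Pre_).
def pvResolveIdx (len : Nat) (i : Int) : Nat := if i < 0 then (i + len).toNat else i.toNat

def pvAppendAt (xss : List (List Int)) (i : Int) (x : Int) : List (List Int) :=
  xss.modify (pvResolveIdx xss.length i) (fun l => l ++ [x])

def build_adjacency (n_nodes : Int) (edges : List (Int × Int)) : List (List Int) :=
  edges.foldl (fun adj uv => pvAppendAt (pvAppendAt adj uv.1 uv.2) uv.2 uv.1)
    (List.replicate n_nodes.toNat [])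

-- key of `max(uncolored, key=lambda v: (len(neighbor_colors[v]), len(adj[v])))`
def pvKeyA (adj nc : List (List Int)) (v : Int) : Int × Int :=
  (((nc.getD v.toNat []).length : Int), ((adj.getD v.toNat []).length : Int))

-- Python `max` with a key: the FIRST element with the lexicographically largest key.
def pvMaxBy (key : Int → Int × Int) : List Int → Int
  | [] => 0  -- unreachable: `uncolored` is non-empty at every use
  | x :: xs => xs.foldl (fun b v =>
      if (key b).1 < (key v).1 ∨ ((key b).1 = (key v).1 ∧ (key b).2 < (key v).2) then v else b) x

-- `c = 0` / `while c in used: c += 1`; fuel |used|+1 suffices (some c ≤ |used| is free).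
def pvMexGo (used : List Int) : Nat → Int → Int
  | 0, c => c
  | fuel+1, c => if c ∈ used then pvMexGo used fuel (c+1) else c

-- the `while uncolored:` loop; fuel = |uncolored| (one vertex is removed per iteration).
-- `uncolored` is CPython's set of ints 0..n-1 in its (ascending) iteration order;
-- `uncolored.remove(u)` keeps that order, modelled by `filter (· != u)`.
def pvALoop (adj : List (List Int)) : Nat → List Int → List (List Int) → List Int → List Int
  | 0, colors, _, _ => colors
  | fuel+1, colors, nc, unc =>
    if unc.isEmpty then colors else
      let u := pvMaxBy (pvKeyA adj nc) unc
      let used := nc.getD u.toNat []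
      let c := pvMexGo used (used.length + 1) 0
      let colors' := colors.set u.toNat c
      let unc' := unc.filter (fun v => v != u)
      let nc' := (adj.getD u.toNat []).foldl
          (fun nc v => if v ∈ unc' then nc.modify v.toNat (fun s => PySem.Set.add s c) else nc) nc
      pvALoop adj fuel colors' nc' unc'

def greedy_dsat_coloring (n_nodes : Int) (edges : List (Int × Int)) : List Int × Int :=
  let adj := build_adjacency n_nodes edges
  let colors0 : List Int := List.replicate n_nodes.toNat (-1)
  let nc0 : List (List Int) := List.replicate n_nodes.toNat []
  let unc0 := PySem.List.pyRange 0 n_nodes 1   -- set(range(n_nodes)), ascending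
  let colors := pvALoop adj unc0.length colors0 nc0 unc0
  (colors, match colors with | [] => 0 | x :: xs => xs.foldl max x + 1)

-- ===== PORT B =====
-- B's leftist heap: a node is (key, rank, left, right), key = (-sat, -deg, vertex).
inductive PvHeap : Type
  | nil : PvHeap
  | node : (Int × Int × Int) → Int → PvHeap → PvHeap → PvHeap
deriving DecidableEq, Repr

def PvHeap.rank : PvHeap → Int
  | .nil => 0
  | .node _ r _ _ => r

def PvHeap.size : PvHeap → Nat
  | .nil => 0
  | .node _ _ l r => l.size + r.size + 1

-- Python tuple `<` on the 3-tuples B uses as heap keys (lexicographic on ints).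
def pvLtT (x y : Int × Int × Int) : Bool :=
  decide (x.1 < y.1 ∨ (x.1 = y.1 ∧ (x.2.1 < y.2.1 ∨ (x.2.1 = y.2.1 ∧ x.2.2 < y.2.2))))

-- tail of _merge: swap children so the higher rank is left, fix the rank
def pvMakeNode (k : Int × Int × Int) (l r : PvHeap) : PvHeap :=
  if l.rank < r.rank then .node k (l.rank + 1) r l else .node k (r.rank + 1) l r

def pvMerge : PvHeap → PvHeap → PvHeap
  | .nil, b => b
  | .node ka ra la rra, .nil => .node ka ra la rra
  | .node ka ra la rra, .node kb rb lb rrb =>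
    if pvLtT kb ka then
      pvMakeNode kb lb (pvMerge rrb (.node ka ra la rra))
    else
      pvMakeNode ka la (pvMerge rra (.node kb rb lb rrb))
termination_by a b => a.size + b.size
decreasing_by all_goals (simp [PvHeap.size]; try omega)

-- B's `while True:` pop loop: pop the min, break on a live entry
-- (vertex still uncolored and its saturation current); fuel = heap size.
def pvBPop (unc : List Int) (nc : List (List Int)) : Nat → PvHeap → Int × PvHeap
  | 0, h => (0, h)           -- unreachable: a live entry exists within `size` pops
  | _+1, .nil => (0, .nil)   -- unreachable (Python would raise on an empty heap)
  | fuel+1, .node k _ l r =>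
    let h' := pvMerge l r
    if k.2.2 ∈ unc ∧ -k.1 = ((nc.getD k.2.2.toNat []).length : Int) then (k.2.2, h')
    else pvBPop unc nc fuel h'

-- B's `while uncolored:` loop; state colors / forbid (= nc) / uncolored / heap.
def pvBLoop (adj : List (List Int)) :
    Nat → List Int → List (List Int) → List Int → PvHeap → List Int
  | 0, colors, _, _, _ => colors
  | fuel+1, colors, nc, unc, heap =>
    if unc.isEmpty then colors else
      let p := pvBPop unc nc heap.size heap
      let u := p.1
      let used := nc.getD u.toNat []
      let c := pvMexGo used (used.length + 1) 0
      let colors' := colors.set u.toNat c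
      let unc' := unc.filter (fun v => v != u)
      let st := (adj.getD u.toNat []).foldl (fun st v =>
          if v ∈ unc' ∧ c ∉ st.1.getD v.toNat [] then
            let nc2 := st.1.modify v.toNat (fun s => PySem.Set.add s c)
            (nc2, pvMerge st.2 (PvHeap.node (-(((nc2.getD v.toNat []).length : Int)),
                -(((adj.getD v.toNat []).length : Int)), v) 1 .nil .nil))
          else st) (nc, p.2)
      pvBLoop adj fuel colors' st.1 unc' st.2

def greedy_dsat_coloring_alt (n_nodes : Int) (edges : List (Int × Int)) : List Int × Int :=
  let adj := edges.foldl (fun adj uv => pvAppendAt (pvAppendAt adj uv.1 uv.2) uv.2 uv.1)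
      (List.replicate n_nodes.toNat [])
  let colors0 : List Int := List.replicate n_nodes.toNat (-1)
  let nc0 : List (List Int) := List.replicate n_nodes.toNat []
  let unc0 := PySem.List.pyRange 0 n_nodes 1
  let heap0 := unc0.foldl (fun h v =>
      pvMerge h (PvHeap.node (0, -(((adj.getD v.toNat []).length : Int)), v) 1 .nil .nil))
      PvHeap.nil
  let colors := pvBLoop adj unc0.length colors0 nc0 unc0 heap0
  (colors, match colors with | [] => 0 | x :: xs => xs.foldl max x + 1)

-- ===== PRECONDITION & SPEC =====
-- Exactly the inputs on which A returns: every edge endpoint must be a valid Python index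
-- into the n_nodes adjacency lists (negative endpoints in [-n, 0) wrap and are admitted);
-- any other endpoint makes A raise IndexError.
def Pre_greedy_dsat_coloring (n_nodes : Int) (edges : List (Int × Int)) : Prop :=
  ∀ e ∈ edges, -n_nodes ≤ e.1 ∧ e.1 < n_nodes ∧ -n_nodes ≤ e.2 ∧ e.2 < n_nodes

instance (n_nodes : Int) (edges : List (Int × Int)) : Decidable (Pre_greedy_dsat_coloring n_nodes edges) := by
  unfold Pre_greedy_dsat_coloring; infer_instance

def pvWitness_greedy_dsat_coloring : Int × (List (Int × Int)) := (3, [(0, 1), (1, 2)])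

def Spec_greedy_dsat_coloring (n_nodes : Int) (edges : List (Int × Int)) (out : List Int × Int) : Prop := out = greedy_dsat_coloring_alt n_nodes edges
instance (n_nodes : Int) (edges : List (Int × Int)) (out : List Int × Int) : Decidable (Spec_greedy_dsat_coloring n_nodes edges out) := by unfold Spec_greedy_dsat_coloring; infer_instance

-- ===== CLAIM (what is proved, stated in full; the proofs are below) =====
def Claim_equal_greedy_dsat_coloring : Prop := ∀ (n_nodes : Int) (edges : List (Int × Int)), Dom_greedy_dsat_coloring n_nodes edges → Pre_greedy_dsat_coloring n_nodes edges → Spec_greedy_dsat_coloring n_nodes edges (greedy_dsat_coloring n_nodes edges)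

-- ===== LEMMAS AND PROOFS =====

-- getD / set / modify bookkeeping
lemma pv_getD_eq_getElem {α : Type} (l : List α) (i : Nat) (d : α) (h : i < l.length) :
    l.getD i d = l[i] := by
  rw [List.getD_eq_getElem?_getD, List.getElem?_eq_getElem h]; rfl

lemma pv_getD_set_self {α : Type} (l : List α) (i : Nat) (h : i < l.length) (v d : α) :
    (l.set i v).getD i d = v := by
  simp [List.getD_eq_getElem?_getD, List.getElem?_set_self h]

lemma pv_getD_set_ne {α : Type} (l : List α) (i j : Nat) (h : i ≠ j) (v d : α) :
    (l.set i v).getD j d = l.getD j d := by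
  simp [List.getD_eq_getElem?_getD, List.getElem?_set_ne h]

lemma pv_getD_modify_ne {α : Type} [Inhabited α] (l : List α) (i j : Nat) (f : α → α) (d : α)
    (h : i ≠ j) : (l.modify i f).getD j d = l.getD j d := by
  rw [List.modify_eq_set, pv_getD_set_ne _ _ _ h]

lemma pv_modify_noop {α : Type} [Inhabited α] (l : List α) (i : Nat) (f : α → α) (d : α)
    (hlen : i < l.length) (h : f (l.getD i d) = l.getD i d) : l.modify i f = l := by
  rw [List.modify_eq_set, List.getElem?_eq_getElem hlen]
  rw [pv_getD_eq_getElem _ _ _ hlen] at h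
  rw [show (some l[i]).getD default = l[i] from rfl, h, List.set_getElem_self]

-- lexicographic-order vocabulary
lemma pvLtT_irrefl (x : Int × Int × Int) : pvLtT x x = false := by
  simp [pvLtT]

lemma pvLtT_trans {x y z : Int × Int × Int} (h1 : pvLtT x y = true) (h2 : pvLtT y z = true) :
    pvLtT x z = true := by
  simp only [pvLtT, decide_eq_true_eq] at *
  omega

lemma pvLtT_trans_not {x y z : Int × Int × Int} (h1 : pvLtT x y = true) (h2 : pvLtT z y = false) :
    pvLtT x z = true := by
  simp only [pvLtT, decide_eq_true_eq, decide_eq_false_iff_not] at *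
  omega

lemma pvLtT_antisymm {x y : Int × Int × Int} (h1 : pvLtT x y = false) (h2 : pvLtT y x = false) :
    x = y := by
  simp only [pvLtT, decide_eq_false_iff_not] at *
  obtain ⟨a, b, c⟩ := x; obtain ⟨d, e, f⟩ := y
  simp only [Prod.mk.injEq]
  simp only at h1 h2
  omega

-- heap contents and size
def PvHeap.toList : PvHeap → List (Int × Int × Int)
  | .nil => []
  | .node k _ l r => k :: (l.toList ++ r.toList)

lemma pv_mem_makeNode (e k : Int × Int × Int) (l r : PvHeap) :
    e ∈ (pvMakeNode k l r).toList ↔ e = k ∨ e ∈ l.toList ∨ e ∈ r.toList := by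
  unfold pvMakeNode
  split <;> (simp [PvHeap.toList]; try tauto)

lemma pv_mem_merge (e : Int × Int × Int) (a b : PvHeap) :
    e ∈ (pvMerge a b).toList ↔ e ∈ a.toList ∨ e ∈ b.toList := by
  induction a, b using pvMerge.induct with
  | case1 b => simp [pvMerge, PvHeap.toList]
  | case2 ka ra la rra => simp [pvMerge, PvHeap.toList]
  | case3 ka ra la rra kb rb lb rrb hlt ih =>
    rw [pvMerge, if_pos hlt, pv_mem_makeNode]
    rw [ih]
    simp [PvHeap.toList]
    tauto
  | case4 ka ra la rra kb rb lb rrb hlt ih =>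
    rw [pvMerge, if_neg hlt, pv_mem_makeNode]
    rw [ih]
    simp [PvHeap.toList]
    tauto

lemma pv_size_merge (a b : PvHeap) : (pvMerge a b).size = a.size + b.size := by
  induction a, b using pvMerge.induct with
  | case1 b => simp [pvMerge, PvHeap.size]
  | case2 ka ra la rra => simp [pvMerge, PvHeap.size]
  | case3 ka ra la rra kb rb lb rrb hlt ih =>
    rw [pvMerge, if_pos hlt]
    unfold pvMakeNode
    split <;> (simp [PvHeap.size, ih]; try omega)
  | case4 ka ra la rra kb rb lb rrb hlt ih =>
    rw [pvMerge, if_neg hlt]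
    unfold pvMakeNode
    split <;> (simp [PvHeap.size, ih]; try omega)

-- heap order: the key of every node is ≤ the keys below it
def PvHeap.Ordered : PvHeap → Prop
  | .nil => True
  | .node k _ l r => (∀ e ∈ l.toList, pvLtT e k = false) ∧ (∀ e ∈ r.toList, pvLtT e k = false) ∧
      l.Ordered ∧ r.Ordered

lemma pv_ordered_root_min (k : Int × Int × Int) (rk : Int) (l r : PvHeap)
    (h : (PvHeap.node k rk l r).Ordered) :
    ∀ e ∈ (PvHeap.node k rk l r).toList, pvLtT e k = false := by
  obtain ⟨h1, h2, -, -⟩ := h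
  intro e he
  simp [PvHeap.toList] at he
  rcases he with rfl | he | he
  · exact pvLtT_irrefl _
  · exact h1 e he
  · exact h2 e he

lemma pv_ordered_makeNode (k : Int × Int × Int) (l r : PvHeap)
    (hl : ∀ e ∈ l.toList, pvLtT e k = false) (hr : ∀ e ∈ r.toList, pvLtT e k = false)
    (hol : l.Ordered) (hor : r.Ordered) : (pvMakeNode k l r).Ordered := by
  unfold pvMakeNode
  split <;> exact ⟨by assumption, by assumption, by assumption, by assumption⟩

lemma pv_ordered_merge (a b : PvHeap) (ha : a.Ordered) (hb : b.Ordered) :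
    (pvMerge a b).Ordered := by
  induction a, b using pvMerge.induct with
  | case1 b => simpa [pvMerge]
  | case2 ka ra la rra => simpa [pvMerge]
  | case3 ka ra la rra kb rb lb rrb hlt ih =>
    rw [pvMerge, if_pos hlt]
    obtain ⟨hbl, hbr, hblo, hbro⟩ := hb
    refine pv_ordered_makeNode _ _ _ hbl ?_ hblo (ih hbro ha)
    intro e he
    rw [pv_mem_merge] at he
    rcases he with he | he
    · exact hbr e he
    · have hroot2 := pv_ordered_root_min ka ra la rra ha e he
      by_contra hc
      have hc' : pvLtT e kb = true := by
        cases hx : pvLtT e kb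
        · exact absurd hx hc
        · rfl
      have htr := pvLtT_trans hc' hlt
      rw [htr] at hroot2
      cases hroot2
  | case4 ka ra la rra kb rb lb rrb hlt ih =>
    rw [pvMerge, if_neg hlt]
    obtain ⟨hal, har, halo, haro⟩ := ha
    refine pv_ordered_makeNode _ _ _ hal ?_ halo (ih haro hb)
    intro e he
    rw [pv_mem_merge] at he
    rcases he with he | he
    · exact har e he
    · have hroot := pv_ordered_root_min kb rb lb rrb hb e he
      by_contra hc
      have hc' : pvLtT e ka = true := by
        cases hx : pvLtT e ka
        · exact absurd hx hc
        · rfl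
      have hnlt : pvLtT kb ka = false := by
        cases hx : pvLtT kb ka
        · rfl
        · exact absurd hx hlt
      have := pvLtT_trans_not hc' hnlt
      rw [this] at hroot
      cases hroot

-- a live heap entry: its vertex is still uncolored and its saturation is current
def pvValid (unc : List Int) (nc : List (List Int)) (e : Int × Int × Int) : Prop :=
  e.2.2 ∈ unc ∧ -e.1 = ((nc.getD e.2.2.toNat []).length : Int)

-- the pop loop returns the vertex of the least LIVE entry and only discards entries ≤ it
lemma pvBPop_spec (unc : List Int) (nc : List (List Int)) (estar : Int × Int × Int)
    (hv : pvValid unc nc estar) :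
    ∀ (fuel : Nat) (heap : PvHeap), heap.size ≤ fuel → heap.Ordered →
    estar ∈ heap.toList →
    (∀ e ∈ heap.toList, pvLtT e estar = true → ¬ pvValid unc nc e) →
    (pvBPop unc nc fuel heap).1 = estar.2.2 ∧
    (pvBPop unc nc fuel heap).2.Ordered ∧
    (∀ e ∈ (pvBPop unc nc fuel heap).2.toList, e ∈ heap.toList) ∧
    (∀ e ∈ heap.toList, pvLtT estar e = true → e ∈ (pvBPop unc nc fuel heap).2.toList) := by
  intro fuel
  induction fuel with
  | zero =>
    intro heap hsz _ hmem _
    cases heap with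
    | nil => cases hmem
    | node k rk l r => simp [PvHeap.size] at hsz
  | succ f ih =>
    intro heap hsz hord hmem hinv
    cases heap with
    | nil => cases hmem
    | node k rk l r =>
      obtain ⟨hol1, hol2, holo, horo⟩ := hord
      have hroot := pv_ordered_root_min k rk l r ⟨hol1, hol2, holo, horo⟩
      by_cases hk : k.2.2 ∈ unc ∧ -k.1 = ((nc.getD k.2.2.toNat []).length : Int)
      · -- live root: it must be estar itself
        have hkv : pvValid unc nc k := hk
        have h1 : pvLtT k estar = false := by
          cases hx : pvLtT k estar
          · rfl
          · exact absurd hkv (hinv k (by simp [PvHeap.toList]) hx)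
        have h2 : pvLtT estar k = false := hroot estar hmem
        have hke : k = estar := pvLtT_antisymm h1 h2
        simp only [pvBPop, if_pos hk]
        refine ⟨by rw [hke], pv_ordered_merge l r holo horo, ?_, ?_⟩
        · intro e he
          rw [pv_mem_merge] at he
          simp [PvHeap.toList]
          tauto
        · intro e he hgt
          have hek : e ≠ k := by
            intro h; rw [h, hke, pvLtT_irrefl] at hgt; cases hgt
          simp [PvHeap.toList] at he
          rcases he with rfl | he | he
          · exact absurd rfl hek
          · rw [pv_mem_merge]; exact Or.inl he
          · rw [pv_mem_merge]; exact Or.inr he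
      · -- stale root: discard it and recurse on the merged children
        have hke : k ≠ estar := by
          intro h; exact hk (h ▸ hv)
        have hmem' : estar ∈ (pvMerge l r).toList := by
          rw [pv_mem_merge]
          simp [PvHeap.toList] at hmem
          rcases hmem with rfl | hm | hm
          · exact absurd rfl hke.symm
          · exact Or.inl hm
          · exact Or.inr hm
        have hsz' : (pvMerge l r).size ≤ f := by
          rw [pv_size_merge]
          simp [PvHeap.size] at hsz
          omega
        have hsub : ∀ e ∈ (pvMerge l r).toList, e ∈ (PvHeap.node k rk l r).toList := by
          intro e he
          rw [pv_mem_merge] at he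
          simp [PvHeap.toList]
          tauto
        have hres := ih (pvMerge l r) hsz' (pv_ordered_merge l r holo horo) hmem'
          (fun e he hlt => hinv e (hsub e he) hlt)
        simp only [pvBPop, if_neg hk]
        refine ⟨hres.1, hres.2.1, fun e he => hsub e (hres.2.2.1 e he), ?_⟩
        intro e he hgt
        have hek : e ≠ k := by
          intro h
          have := hroot estar hmem
          rw [h] at hgt
          rw [hgt] at this
          cases this
        have he' : e ∈ (pvMerge l r).toList := by
          rw [pv_mem_merge]
          simp [PvHeap.toList] at he
          tauto
        exact hres.2.2.2 e he' hgt

-- Python max with key: first lexicographic maximum of a strictly increasing list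
def pvLtK (p q : Int × Int) : Prop := p.1 < q.1 ∨ (p.1 = q.1 ∧ p.2 < q.2)

lemma pvMaxBy_go_spec (key : Int → Int × Int) :
    ∀ (xs : List Int) (b : Int),
    (xs.foldl (fun b v =>
        if (key b).1 < (key v).1 ∨ ((key b).1 = (key v).1 ∧ (key b).2 < (key v).2) then v else b) b)
      ∈ b :: xs ∧
    ((xs.foldl (fun b v =>
        if (key b).1 < (key v).1 ∨ ((key b).1 = (key v).1 ∧ (key b).2 < (key v).2) then v else b) b)
      = b ∨ pvLtK (key b) (key (xs.foldl (fun b v =>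
        if (key b).1 < (key v).1 ∨ ((key b).1 = (key v).1 ∧ (key b).2 < (key v).2) then v else b) b))) ∧
    (∀ v ∈ b :: xs, ¬ pvLtK (key (xs.foldl (fun b v =>
        if (key b).1 < (key v).1 ∨ ((key b).1 = (key v).1 ∧ (key b).2 < (key v).2) then v else b) b)) (key v)) ∧
    ((b :: xs).Pairwise (· < ·) → ∀ v ∈ b :: xs, key v = key (xs.foldl (fun b v =>
        if (key b).1 < (key v).1 ∨ ((key b).1 = (key v).1 ∧ (key b).2 < (key v).2) then v else b) b) →
      (xs.foldl (fun b v =>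
        if (key b).1 < (key v).1 ∨ ((key b).1 = (key v).1 ∧ (key b).2 < (key v).2) then v else b) b) ≤ v) := by
  intro xs
  induction xs with
  | nil =>
    intro b
    simp only [List.foldl_nil]
    refine ⟨by simp, ?_, ?_, ?_⟩
    · exact Or.inl trivial
    · intro v hv
      rcases List.mem_cons.mp hv with hvb | hv'
      · subst hvb
        unfold pvLtK
        omega
      · cases hv'
    · intro _ v hv hk
      rcases List.mem_cons.mp hv with hvb | hv'
      · omega
      · cases hv'
  | cons x xs ih =>
    intro b
    simp only [List.foldl_cons]
    by_cases h : (key b).1 < (key x).1 ∨ ((key b).1 = (key x).1 ∧ (key b).2 < (key x).2)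
    · rw [if_pos h]
      obtain ⟨i1, i2, i3, i4⟩ := ih x
      set res := xs.foldl (fun b v =>
        if (key b).1 < (key v).1 ∨ ((key b).1 = (key v).1 ∧ (key b).2 < (key v).2) then v else b) x with hres
      have hbr : pvLtK (key b) (key res) := by
        rcases i2 with h2 | h2
        · rw [h2]; exact h
        · unfold pvLtK at *; omega
      refine ⟨List.mem_cons_of_mem b i1, Or.inr hbr, ?_, ?_⟩
      · intro v hv
        rcases List.mem_cons.mp hv with hvb | hv'
        · subst hvb
          unfold pvLtK at hbr ⊢
          omega
        · exact i3 v hv'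
      · intro hp v hv hkey
        rcases List.mem_cons.mp hv with hvb | hv'
        · exfalso
          subst hvb
          rw [hkey] at hbr
          unfold pvLtK at hbr
          omega
        · exact i4 (hp.sublist (List.sublist_cons_self b (x :: xs))) v hv' hkey
    · rw [if_neg h]
      obtain ⟨i1, i2, i3, i4⟩ := ih b
      set res := xs.foldl (fun b v =>
        if (key b).1 < (key v).1 ∨ ((key b).1 = (key v).1 ∧ (key b).2 < (key v).2) then v else b) b with hres
      refine ⟨?_, i2, ?_, ?_⟩
      · rcases List.mem_cons.mp i1 with h1 | h1
        · rw [h1]; exact List.mem_cons_self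
        · exact List.mem_cons_of_mem b (List.mem_cons_of_mem x h1)
      · intro v hv
        rcases List.mem_cons.mp hv with hvb | hv1
        · subst hvb
          exact i3 v List.mem_cons_self
        · rcases List.mem_cons.mp hv1 with hvx | hv2
          · subst hvx
            intro hc
            apply h
            rcases i2 with h2 | h2
            · rw [← h2]; exact hc
            · unfold pvLtK at *; omega
          · exact i3 v (List.mem_cons_of_mem b hv2)
      · intro hp v hv hkey
        have hp' : (b :: xs).Pairwise (· < ·) :=
          hp.sublist ((xs.sublist_cons_self x).cons_cons b)
        rcases List.mem_cons.mp hv with hvb | hv1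
        · subst hvb
          exact i4 hp' v List.mem_cons_self hkey
        · rcases List.mem_cons.mp hv1 with hvx | hv2
          · subst hvx
            rcases i2 with h2 | h2
            · rw [h2]
              exact le_of_lt (List.rel_of_pairwise_cons hp List.mem_cons_self)
            · exfalso
              rw [← hkey] at h2
              apply h
              unfold pvLtK at h2
              exact h2
          · exact i4 hp' v (List.mem_cons_of_mem b hv2) hkey

lemma pvMaxBy_spec (key : Int → Int × Int) (x : Int) (xs : List Int)
    (hp : (x :: xs).Pairwise (· < ·)) :
    pvMaxBy key (x :: xs) ∈ x :: xs ∧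
    (∀ v ∈ x :: xs, ¬ pvLtK (key (pvMaxBy key (x :: xs))) (key v)) ∧
    (∀ v ∈ x :: xs, key v = key (pvMaxBy key (x :: xs)) → pvMaxBy key (x :: xs) ≤ v) := by
  obtain ⟨i1, _, i3, i4⟩ := pvMaxBy_go_spec key xs x
  exact ⟨i1, i3, i4 hp⟩

-- the joint heap invariant of B's loop, relative to A's loop state (nc, unc)
def pvHInv (adj : List (List Int)) (n : Nat) (nc : List (List Int)) (unc : List Int)
    (heap : PvHeap) : Prop :=
  heap.Ordered ∧
  (∀ v ∈ unc, (-(((nc.getD v.toNat []).length : Int)),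
      -(((adj.getD v.toNat []).length : Int)), v) ∈ heap.toList) ∧
  (∀ e ∈ heap.toList, 0 ≤ e.2.2 ∧ e.2.2 < (n : Int) ∧
      e.2.1 = -(((adj.getD e.2.2.toNat []).length : Int)))

-- the neighbour-update folds: A's nc fold and B's (nc, heap) fold stay in sync
lemma pv_upd (adj : List (List Int)) (n : Nat) (c : Int) (unc' : List Int)
    (huncm : ∀ v ∈ unc', 0 ≤ v ∧ v < (n : Int)) :
    ∀ (au : List Int) (nc : List (List Int)) (heap : PvHeap),
    nc.length = n → pvHInv adj n nc unc' heap →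
    (au.foldl (fun st v =>
        if v ∈ unc' ∧ c ∉ st.1.getD v.toNat [] then
          let nc2 := st.1.modify v.toNat (fun s => PySem.Set.add s c)
          (nc2, pvMerge st.2 (PvHeap.node (-(((nc2.getD v.toNat []).length : Int)),
              -(((adj.getD v.toNat []).length : Int)), v) 1 .nil .nil))
        else st) (nc, heap)).1
      = au.foldl (fun nc v => if v ∈ unc' then nc.modify v.toNat (fun s => PySem.Set.add s c) else nc) nc ∧
    (au.foldl (fun nc v => if v ∈ unc' then nc.modify v.toNat (fun s => PySem.Set.add s c) else nc) nc).length = n ∧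
    pvHInv adj n
      (au.foldl (fun nc v => if v ∈ unc' then nc.modify v.toNat (fun s => PySem.Set.add s c) else nc) nc)
      unc'
      (au.foldl (fun st v =>
        if v ∈ unc' ∧ c ∉ st.1.getD v.toNat [] then
          let nc2 := st.1.modify v.toNat (fun s => PySem.Set.add s c)
          (nc2, pvMerge st.2 (PvHeap.node (-(((nc2.getD v.toNat []).length : Int)),
              -(((adj.getD v.toNat []).length : Int)), v) 1 .nil .nil))
        else st) (nc, heap)).2 := by
  intro au
  induction au with
  | nil => exact fun nc heap hlen hinv => ⟨rfl, hlen, hinv⟩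
  | cons w au ih =>
    intro nc heap hlen hinv
    obtain ⟨hord, hfresh, hent⟩ := hinv
    simp only [List.foldl_cons]
    by_cases hw : w ∈ unc'
    · have hwb := huncm w hw
      have hwn : w.toNat < n := by omega
      by_cases hc : c ∈ nc.getD w.toNat []
      · -- colour already forbidden: A's add is a no-op, B skips
        rw [if_neg (by rintro ⟨-, h2⟩; exact h2 hc), if_pos hw]
        rw [pv_modify_noop _ _ _ ([] : List Int) (by omega) (PySem.Set.add_of_mem hc)]
        exact ih nc heap hlen ⟨hord, hfresh, hent⟩
      · -- new colour: both add it; B also pushes a fresh entry for w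
        rw [if_pos ⟨hw, hc⟩, if_pos hw]
        set nc2 := nc.modify w.toNat (fun s => PySem.Set.add s c) with hnc2
        apply ih
        · simp [hnc2, hlen]
        · refine ⟨?_, ?_, ?_⟩
          · exact pv_ordered_merge _ _ hord (by exact ⟨by simp [PvHeap.toList], by simp [PvHeap.toList], trivial, trivial⟩)
          · intro v hv
            rw [pv_mem_merge]
            by_cases hvw : v = w
            · subst hvw
              right
              simp [PvHeap.toList]
            · left
              have hvt : v.toNat ≠ w.toNat := by
                have := huncm v hv
                omega
              rw [show nc2.getD v.toNat [] = nc.getD v.toNat [] from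
                pv_getD_modify_ne _ _ _ _ _ (fun h => hvt h.symm)]
              exact hfresh v hv
          · intro e he
            rw [pv_mem_merge] at he
            rcases he with he | he
            · exact hent e he
            · simp [PvHeap.toList] at he
              subst he
              exact ⟨hwb.1, hwb.2, rfl⟩
    · rw [if_neg (by rintro ⟨h1, -⟩; exact hw h1), if_neg hw]
      exact ih nc heap hlen ⟨hord, hfresh, hent⟩

-- pvMexGo starting at a non-negative value stays non-negative
lemma pvMexGo_nonneg (used : List Int) :
    ∀ (fuel : Nat) (k : Int), 0 ≤ k → 0 ≤ pvMexGo used fuel k := by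
  intro fuel
  induction fuel with
  | zero => intro k hk; simpa [pvMexGo] using hk
  | succ g ihg =>
    intro k hk
    simp only [pvMexGo]
    split
    · exact ihg (k + 1) (by omega)
    · exact hk

-- the initial heap: one entry (0, -deg v, v) per vertex, heap-ordered
lemma pv_heap0_ordered (adj : List (List Int)) :
    ∀ (l : List Int) (h : PvHeap), h.Ordered →
    (l.foldl (fun h v =>
        pvMerge h (PvHeap.node (0, -(((adj.getD v.toNat []).length : Int)), v) 1 .nil .nil)) h).Ordered := by
  intro l
  induction l with
  | nil => exact fun h hh => hh
  | cons x xs ih =>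
    intro h hh
    simp only [List.foldl_cons]
    exact ih _ (pv_ordered_merge _ _ hh
      ⟨by simp [PvHeap.toList], by simp [PvHeap.toList], trivial, trivial⟩)

lemma pv_heap0_mem (adj : List (List Int)) :
    ∀ (l : List Int) (h : PvHeap) (e : Int × Int × Int),
    (e ∈ (l.foldl (fun h v =>
        pvMerge h (PvHeap.node (0, -(((adj.getD v.toNat []).length : Int)), v) 1 .nil .nil)) h).toList
      ↔ e ∈ h.toList ∨ ∃ v ∈ l, e = (0, -(((adj.getD v.toNat []).length : Int)), v)) := by
  intro l
  induction l with
  | nil => simp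
  | cons x xs ih =>
    intro h e
    simp only [List.foldl_cons]
    rw [ih]
    rw [pv_mem_merge]
    simp [PvHeap.toList]
    tauto

-- the main simulation: A's loop and B's loop produce the same colour list
lemma pv_sim (adj : List (List Int)) (n : Nat) :
    ∀ (fuel : Nat) (colors : List Int) (nc : List (List Int)) (unc : List Int) (heap : PvHeap),
      colors.length = n → nc.length = n →
      unc = (PySem.List.pyRange 0 (n : Int) 1).filter
          (fun v => decide (colors.getD v.toNat 0 = -1)) →
      fuel = unc.length →
      pvHInv adj n nc unc heap →
      pvALoop adj fuel colors nc unc = pvBLoop adj fuel colors nc unc heap := by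
  intro fuel
  induction fuel with
  | zero => intro colors nc unc heap _ _ _ _ _; rfl
  | succ f ih =>
    intro colors nc unc heap hcl hncl hunc hfuel hinv
    obtain ⟨hord, hfresh, hent⟩ := hinv
    obtain ⟨x, xs, hxs⟩ : ∃ x xs, unc = x :: xs := by
      cases unc with
      | nil => simp at hfuel
      | cons a l => exact ⟨a, l, rfl⟩
    have hmemunc : ∀ v ∈ unc, 0 ≤ v ∧ v < (n : Int) ∧ colors.getD v.toNat 0 = -1 := by
      intro v hv
      rw [hunc] at hv
      have h1 := List.mem_filter.mp hv
      have h2 := PySem.List.mem_pyRange_one.mp h1.1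
      exact ⟨h2.1, h2.2, of_decide_eq_true h1.2⟩
    have hpw : unc.Pairwise (· < ·) := by
      rw [hunc]
      exact (PySem.List.pairwise_lt_pyRange_one 0 (n : Int)).filter _
    have hne : unc.isEmpty = false := by rw [hxs]; rfl
    simp only [pvALoop, pvBLoop, hne, Bool.false_eq_true, if_false]
    set u := pvMaxBy (pvKeyA adj nc) unc with hu
    obtain ⟨hmem, hmax, hfirst⟩ := by
      rw [hxs] at hpw
      have := pvMaxBy_spec (pvKeyA adj nc) x xs hpw
      rw [← hxs] at this
      exact this
    rw [← hu] at hmem hmax hfirst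
    obtain ⟨hu0, hultn, hucol⟩ := hmemunc u hmem
    have hun' : u.toNat < n := by omega
    -- the live entry of the selected vertex
    set estar : Int × Int × Int :=
      (-(((nc.getD u.toNat []).length : Int)), -(((adj.getD u.toNat []).length : Int)), u)
      with hestar
    have hvalid : pvValid unc nc estar := ⟨hmem, by simp [hestar]⟩
    have hinvb : ∀ e ∈ heap.toList, pvLtT e estar = true → ¬ pvValid unc nc e := by
      rintro ⟨a, b, w⟩ he hlt ⟨hwm, hwa⟩
      obtain ⟨hw0, hwlt, hwb⟩ := hent _ he
      simp only at hwa hwb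
      have hkey := hmax w hwm
      simp only [pvLtT, hestar, decide_eq_true_eq] at hlt
      simp only [pvKeyA, pvLtK] at hkey
      by_cases hks : ((nc.getD w.toNat []).length : Int) = ((nc.getD u.toNat []).length : Int) ∧
          ((adj.getD w.toNat []).length : Int) = ((adj.getD u.toNat []).length : Int)
      · have hkeq : pvKeyA adj nc w = pvKeyA adj nc u := by
          simp only [pvKeyA, Prod.mk.injEq]
          exact hks
        have := hfirst w hwm hkeq
        omega
      · omega
    have hestar_mem : estar ∈ heap.toList := hfresh u hmem
    have hpop := pvBPop_spec unc nc estar hvalid heap.size heap le_rfl hord hestar_mem hinvb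
    -- both loops pick the same vertex u, hence the same colour c
    have hpick : (pvBPop unc nc heap.size heap).1 = u := hpop.1
    rw [hpick]
    set c := pvMexGo (nc.getD u.toNat []) ((nc.getD u.toNat []).length + 1) 0 with hc
    set colors' := colors.set u.toNat c with hcolors'
    set unc' := unc.filter (fun v => v != u) with hunc'
    set h1 := (pvBPop unc nc heap.size heap).2 with hh1
    have hc0 : 0 ≤ c := pvMexGo_nonneg _ _ 0 le_rfl
    -- the filtered uncoloured list is again the canonical filter
    have huncP : unc' = (PySem.List.pyRange 0 (n : Int) 1).filter
        (fun v => decide (colors'.getD v.toNat 0 = -1)) := by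
      rw [hunc', hunc, List.filter_filter]
      apply List.filter_congr
      intro v hv
      have hv' := PySem.List.mem_pyRange_one.mp hv
      by_cases hvu : v = u
      · subst hvu
        rw [hcolors', pv_getD_set_self _ _ (by omega) _ _]
        simp
        omega
      · have htne : u.toNat ≠ v.toNat := by
          have h0 := hv'.1
          omega
        rw [hcolors', pv_getD_set_ne _ _ _ htne _ _]
        simp [hvu]
    have huncmem' : ∀ v ∈ unc', 0 ≤ v ∧ v < (n : Int) := by
      intro v hv
      have := hmemunc v (List.mem_of_mem_filter hv)
      exact ⟨this.1, this.2.1⟩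
    -- fuel: one vertex was removed
    have hfuel' : f = unc'.length := by
      have hnd : unc.Nodup := hpw.nodup
      have herase : unc' = unc.erase u := by
        rw [hunc']
        exact (List.Nodup.erase_eq_filter hnd u).symm
      rw [herase, List.length_erase_of_mem hmem]
      omega
    -- heap invariant after the pop, for the shrunken uncoloured list
    have hinv1 : pvHInv adj n nc unc' h1 := by
      refine ⟨hpop.2.1, ?_, fun e he => hent e (hpop.2.2.1 e he)⟩
      intro v hv
      have hvu : v ≠ u := by
        have := (List.mem_filter.mp hv).2
        simpa using this
      have hvm : v ∈ unc := List.mem_of_mem_filter hv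
      have hkey := hmax v hvm
      simp only [pvKeyA, pvLtK] at hkey
      apply hpop.2.2.2 _ (hfresh v hvm)
      simp only [pvLtT, hestar, decide_eq_true_eq]
      by_cases hks : ((nc.getD v.toNat []).length : Int) = ((nc.getD u.toNat []).length : Int) ∧
          ((adj.getD v.toNat []).length : Int) = ((adj.getD u.toNat []).length : Int)
      · have hkeq : pvKeyA adj nc v = pvKeyA adj nc u := by
          simp only [pvKeyA, Prod.mk.injEq]
          exact hks
        have := hfirst v hvm hkeq
        right
        refine ⟨by omega, Or.inr ⟨by omega, by omega⟩⟩
      · omega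
    -- the neighbour-update folds stay in sync
    have hupd := pv_upd adj n c unc' huncmem' (adj.getD u.toNat []) nc h1 hncl hinv1
    rw [hupd.1]
    exact ih colors'
      ((adj.getD u.toNat []).foldl
        (fun nc v => if v ∈ unc' then nc.modify v.toNat (fun s => PySem.Set.add s c) else nc) nc)
      unc' _ (by simp [hcolors', hcl]) hupd.2.1 huncP hfuel' hupd.2.2

-- ===== VERDICT (by name: the statement is the Claim_ definition above) =====
theorem greedy_dsat_coloring_spec : Claim_equal_greedy_dsat_coloring := by
  intro n_nodes edges _hdom _hpre
  unfold Spec_greedy_dsat_coloring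
  simp only [greedy_dsat_coloring, greedy_dsat_coloring_alt]
  have hrange : PySem.List.pyRange 0 n_nodes 1 = PySem.List.pyRange 0 (n_nodes.toNat : Int) 1 := by
    rcases le_or_gt 0 n_nodes with h | h
    · rw [Int.toNat_of_nonneg h]
    · rw [PySem.List.pyRange_one_eq_nil (by omega), PySem.List.pyRange_one_eq_nil (by omega)]
  have hlen : (PySem.List.pyRange 0 n_nodes 1).length = n_nodes.toNat := by
    rw [PySem.List.length_pyRange_one]
    simp
  have hfilter : PySem.List.pyRange 0 n_nodes 1
      = (PySem.List.pyRange 0 (n_nodes.toNat : Int) 1).filter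
          (fun v => decide ((List.replicate n_nodes.toNat (-1 : Int)).getD v.toNat 0 = -1)) := by
    rw [← hrange]
    symm
    rw [List.filter_eq_self]
    intro v hv
    have h1 := PySem.List.mem_pyRange_one.mp hv
    have hvn : v.toNat < n_nodes.toNat := by omega
    rw [List.getD_replicate _ hvn]
    simp
  have hinv0 : pvHInv (build_adjacency n_nodes edges) n_nodes.toNat
      (List.replicate n_nodes.toNat [])
      (PySem.List.pyRange 0 n_nodes 1)
      ((PySem.List.pyRange 0 n_nodes 1).foldl (fun h v =>
        pvMerge h (PvHeap.node (0, -((((build_adjacency n_nodes edges).getD v.toNat []).length : Int)), v) 1 .nil .nil))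
        PvHeap.nil) := by
    refine ⟨pv_heap0_ordered _ _ _ trivial, ?_, ?_⟩
    · intro v hv
      rw [pv_heap0_mem]
      right
      refine ⟨v, hv, ?_⟩
      have h1 := PySem.List.mem_pyRange_one.mp hv
      have hvn : v.toNat < n_nodes.toNat := by omega
      rw [List.getD_replicate _ hvn]
      simp
    · intro e he
      rw [pv_heap0_mem] at he
      rcases he with he | ⟨v, hv, rfl⟩
      · simp [PvHeap.toList] at he
      · have h1 := PySem.List.mem_pyRange_one.mp hv
        refine ⟨h1.1, ?_, rfl⟩
        show v < ((n_nodes.toNat : Nat) : Int)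
        omega
  have hcolors := pv_sim (build_adjacency n_nodes edges) n_nodes.toNat
    (PySem.List.pyRange 0 n_nodes 1).length
    (List.replicate n_nodes.toNat (-1))
    (List.replicate n_nodes.toNat [])
    (PySem.List.pyRange 0 n_nodes 1)
    _
    (by simp) (by simp) hfilter (by rfl) hinv0
  rw [show build_adjacency n_nodes edges
      = edges.foldl (fun adj uv => pvAppendAt (pvAppendAt adj uv.1 uv.2) uv.2 uv.1)
          (List.replicate n_nodes.toNat []) from rfl] at hcolors
  rw [← hcolors]
  rfl
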